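-- pv_equiv track=rewrite | github.com/almehj/project-euler | problem0100/root_tests.py | is_PSq
-- ===== SOURCE A (Python) =====
-- def partial_digital_root(n):
--
--     answer = 0
--
--     while n > 0:
--         d = n%10
--         if d != 9:
--             answer += d
--         n //= 10
--
--     return answer
--
-- def digital_root(n):
--
--     answer = n
--
--     while answer >= 10:
--         answer = partial_digital_root(answer)
--
--     return answer
--
-- def count_zeros(n):
--     n_zeros = 0
--
--     d = n%10
--     while n > 0 and d == 0:
--         n_zeros += 1
--         n //= 10
--         d = n%10
--     return n_zeros
--
-- def units_test(n):
--
--     d = n%10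
--
--     if d in [2,3,7,8]:
--         return False
--     else:
--         return True
--
-- def test_root(n):
--
--     return digital_root(n) in [1,4,7,9]
--
-- def test_25(n):
--
--     if n%10 == 5 and (n//10)%10 != 2:
--         return False
--     else:
--         return True
--
-- def test_6units(n):
--
--     d = n%10
--     td = (n//10)%10
--     if d == 6:
--         return td%2 != 0
--     else:
--         return td%2 == 0
--
-- def test_even4(n):
--     if n%2 == 0:
--         return (n%100)%4 == 0
--     else:
--         return True
--
-- def is_PSq(n):
--
--     nz = count_zeros(n)
--     if nz%2 != 0:
--         return False
--     else:
--         while nz > 0: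
--             n //= 10
--             nz -= 1
--
--     if not units_test(n):
--         return False
--
--     if not test_root(n):
--         return False
--
--     if not test_25(n):
--         return False
--
--     if not test_6units(n):
--         return False
--
--     if not test_even4(n):
--         return False
--
--     return True
-- ===== SOURCE B (Python) =====
-- # B: one fused pass over the digits (LSB first) collects the trailing-zero
-- # count, the last two digits of the zero-stripped value and its nine-skipping
-- # digit sum, replacing A's staged passes (count_zeros, strip loop, four
-- # separate predicate functions); the four last-two-digit predicates are
-- # algebraically merged into a single three-case condition (test_even4 is
-- # redundant given the others).
--
-- def is_PSq(n):
--     zeros = 0   # trailing zeros of n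
--     u = t = 0   # last and second-to-last digit of the stripped value
--     s = 0       # nine-skipping digit sum of the stripped value
--     ndig = 0    # digit count of the stripped value
--     m = n
--     while m > 0:
--         d = m % 10
--         m //= 10
--         if ndig == 0 and d == 0:
--             zeros += 1
--             continue
--         if ndig == 0:
--             u = d
--         elif ndig == 1:
--             t = d
--         if d != 9:
--             s += d
--         ndig += 1
--     if zeros % 2 != 0:
--         return False
--     if not ((u == 5 and t == 2) or (u in (1, 4, 9) and t % 2 == 0)
--             or (u == 6 and t % 2 == 1)):
--         return False
--     r = u if ndig == 1 else s
--     while r >= 10: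
--         r2 = 0
--         while r > 0:
--             if r % 10 != 9:
--                 r2 += r % 10
--             r //= 10
--         r = r2
--     return r in (1, 4, 7, 9)
-- ===== Notes on version B (the rewrite author's own statement) =====
-- stated objective: alternative
-- what changed: One fused LSB-first digit pass collects the trailing-zero count, the last two digits of the stripped value and its nine-skipping digit sum, replacing A's staged passes (count_zeros, a separate strip loop, then four separate predicate functions each rescanning the last digits), and the four last-two-digit predicates are algebraically merged into a single three-case condition on (units, tens) with test_even4 proved redundant.
import Mathlib
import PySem

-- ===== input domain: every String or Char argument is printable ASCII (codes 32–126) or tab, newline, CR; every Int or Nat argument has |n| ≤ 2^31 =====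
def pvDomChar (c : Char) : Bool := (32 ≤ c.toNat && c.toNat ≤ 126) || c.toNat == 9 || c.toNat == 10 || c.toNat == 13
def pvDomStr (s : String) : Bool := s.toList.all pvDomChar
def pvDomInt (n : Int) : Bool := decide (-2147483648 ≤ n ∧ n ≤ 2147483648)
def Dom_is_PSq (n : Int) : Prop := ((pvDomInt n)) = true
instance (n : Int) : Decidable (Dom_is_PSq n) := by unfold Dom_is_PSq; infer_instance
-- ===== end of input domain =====

-- B replaces A's staged digit passes (count zeros, strip, four separate
-- last-two-digit predicate functions) by ONE fused LSB-first pass collecting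
-- zeros / last two stripped digits / nine-skipping digit sum, and merges the four
-- predicates into one three-case condition on those two digits.
-- (While loops are ported with a fuel parameter strictly exceeding the number
-- of iterations the Python loop performs, so each port computes its Python's value.)

-- ===== PORT A =====
-- while n > 0: d = n%10; if d != 9: answer += d; n //= 10
def pdrLoop : Nat → Int → Int → Int
  | 0, _, answer => answer
  | fuel + 1, n, answer =>
    if 0 < n then
      pdrLoop fuel (PySem.Int.floordiv n 10)
        (if PySem.Int.mod n 10 ≠ 9 then answer + PySem.Int.mod n 10 else answer)
    else answer

def partial_digital_root (n : Int) : Int := pdrLoop (n.toNat + 1) n 0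

-- while answer >= 10: answer = partial_digital_root(answer)
def drLoop : Nat → Int → Int
  | 0, answer => answer
  | fuel + 1, answer =>
    if 10 ≤ answer then drLoop fuel (partial_digital_root answer) else answer

def digital_root (n : Int) : Int := drLoop (n.toNat + 1) n

-- d = n%10; while n > 0 and d == 0: n_zeros += 1; n //= 10; d = n%10
def czLoop : Nat → Int → Int → Int
  | 0, _, n_zeros => n_zeros
  | fuel + 1, n, n_zeros =>
    if 0 < n ∧ PySem.Int.mod n 10 = 0 then
      czLoop fuel (PySem.Int.floordiv n 10) (n_zeros + 1)
    else n_zeros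

def count_zeros (n : Int) : Int := czLoop (n.toNat + 1) n 0

def units_test (n : Int) : Bool :=
  if PySem.Int.mod n 10 ∈ ([2, 3, 7, 8] : List Int) then false else true

def test_root (n : Int) : Bool :=
  digital_root n ∈ ([1, 4, 7, 9] : List Int)

def test_25 (n : Int) : Bool :=
  if PySem.Int.mod n 10 = 5 ∧ PySem.Int.mod (PySem.Int.floordiv n 10) 10 ≠ 2 then false
  else true

def test_6units (n : Int) : Bool :=
  let d := PySem.Int.mod n 10
  let td := PySem.Int.mod (PySem.Int.floordiv n 10) 10
  if d = 6 then decide (PySem.Int.mod td 2 ≠ 0) else decide (PySem.Int.mod td 2 = 0)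

def test_even4 (n : Int) : Bool :=
  if PySem.Int.mod n 2 = 0 then decide (PySem.Int.mod (PySem.Int.mod n 100) 4 = 0)
  else true

-- while nz > 0: n //= 10; nz -= 1   (runs exactly max(nz,0) times)
def stripLoop : Nat → Int → Int → Int
  | 0, n, _ => n
  | fuel + 1, n, nz =>
    if 0 < nz then stripLoop fuel (PySem.Int.floordiv n 10) (nz - 1) else n

def is_PSq (n : Int) : Bool :=
  let nz := count_zeros n
  if PySem.Int.mod nz 2 ≠ 0 then false
  else
    let n := stripLoop (nz.toNat + 1) n nz
    if ¬ units_test n then false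
    else if ¬ test_root n then false
    else if ¬ test_25 n then false
    else if ¬ test_6units n then false
    else if ¬ test_even4 n then false
    else true

-- ===== PORT B =====
-- the fused pass: state (zeros, u, t, s, ndig), one iteration per digit of m
def bLoop : Nat → Int → Int → Int → Int → Int → Int → Int × Int × Int × Int × Int
  | 0, _, z, u, t, s, nd => (z, u, t, s, nd)
  | fuel + 1, m, z, u, t, s, nd =>
    if 0 < m then
      if nd = 0 ∧ PySem.Int.mod m 10 = 0 then
        bLoop fuel (PySem.Int.floordiv m 10) (z + 1) u t s nd
      else
        bLoop fuel (PySem.Int.floordiv m 10) z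
          (if nd = 0 then PySem.Int.mod m 10 else u)
          (if nd = 1 then PySem.Int.mod m 10 else t)
          (if PySem.Int.mod m 10 ≠ 9 then s + PySem.Int.mod m 10 else s) (nd + 1)
    else (z, u, t, s, nd)

-- inner: r2 = 0; while r > 0: if r%10 != 9: r2 += r%10; r //= 10
def bSumLoop : Nat → Int → Int → Int
  | 0, _, r2 => r2
  | fuel + 1, r, r2 =>
    if 0 < r then
      bSumLoop fuel (PySem.Int.floordiv r 10)
        (if PySem.Int.mod r 10 ≠ 9 then r2 + PySem.Int.mod r 10 else r2)
    else r2

-- while r >= 10: (inner loop); r = r2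
def bRedLoop : Nat → Int → Int
  | 0, r => r
  | fuel + 1, r =>
    if 10 ≤ r then bRedLoop fuel (bSumLoop (r.toNat + 1) r 0) else r

def is_PSq_alt (n : Int) : Bool :=
  let p := bLoop (n.toNat + 1) n 0 0 0 0 0
  let z := p.1
  let u := p.2.1
  let t := p.2.2.1
  let s := p.2.2.2.1
  let nd := p.2.2.2.2
  if PySem.Int.mod z 2 ≠ 0 then false
  else if ¬ ((u = 5 ∧ t = 2) ∨ (u ∈ ([1, 4, 9] : List Int) ∧ PySem.Int.mod t 2 = 0)
             ∨ (u = 6 ∧ PySem.Int.mod t 2 = 1)) then false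
  else
    let r := if nd = 1 then u else s
    bRedLoop (r.toNat + 1) r ∈ ([1, 4, 7, 9] : List Int)

-- ===== PRECONDITION & SPEC =====
def Spec_is_PSq (n : Int) (out : Bool) : Prop := out = is_PSq_alt n
instance (n : Int) (out : Bool) : Decidable (Spec_is_PSq n out) := by unfold Spec_is_PSq; infer_instance

-- ===== CLAIM (what is proved, stated in full; the proofs are below) =====
def Claim_equal_is_PSq : Prop := ∀ (n : Int), Dom_is_PSq n → Spec_is_PSq n (is_PSq n)

-- ===== LEMMAS AND PROOFS =====

theorem bSumLoop_eq_pdrLoop : ∀ (k : Nat) (n s : Int), bSumLoop k n s = pdrLoop k n s := by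
  intro k
  induction k with
  | zero => intro n s; rfl
  | succ k ih =>
    intro n s
    unfold bSumLoop pdrLoop
    split
    · exact ih _ _
    · rfl

theorem bRedLoop_eq_drLoop : ∀ (k : Nat) (n : Int), bRedLoop k n = drLoop k n := by
  intro k
  induction k with
  | zero => intro n; rfl
  | succ k ih =>
    intro n
    unfold bRedLoop drLoop
    split
    · rw [bSumLoop_eq_pdrLoop]
      exact ih _
    · rfl

theorem pdrLoop_ge : ∀ (k : Nat) (n s : Int), s ≤ pdrLoop k n s := by
  intro k
  induction k with
  | zero => intro n s; simp [pdrLoop]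
  | succ k ih =>
    intro n s
    unfold pdrLoop
    split
    · rename_i hn
      have hd : 0 ≤ PySem.Int.mod n 10 := PySem.Int.mod_nonneg n (by omega)
      split
      · have := ih (PySem.Int.floordiv n 10) (s + PySem.Int.mod n 10)
        omega
      · have := ih (PySem.Int.floordiv n 10) s
        omega
    · omega

theorem pdrLoop_le : ∀ (k : Nat) (n s : Int), 0 ≤ n → pdrLoop k n s ≤ s + n := by
  intro k
  induction k with
  | zero => intro n s hn; simp [pdrLoop]; omega
  | succ k ih =>
    intro n s hn
    unfold pdrLoop
    split
    · rename_i hpos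
      have h10 : PySem.Int.floordiv n 10 = n / 10 := PySem.Int.floordiv_eq_ediv_of_pos (by omega)
      have hm : PySem.Int.mod n 10 = n % 10 := PySem.Int.mod_eq_emod_of_pos (by omega)
      have hq : 0 ≤ n / 10 := by omega
      rw [h10, hm]
      split
      · have := ih (n / 10) (s + n % 10) hq
        omega
      · have := ih (n / 10) s hq
        omega
    · omega

theorem pdr_lt : ∀ (n : Int), 10 ≤ n → 0 ≤ partial_digital_root n ∧ partial_digital_root n < n := by
  intro n hn
  constructor
  · exact pdrLoop_ge _ n 0
  · unfold partial_digital_root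
    have hfuel : n.toNat + 1 = n.toNat - 1 + 1 + 1 := by omega
    rw [hfuel]
    unfold pdrLoop
    rw [if_pos (by omega : (0:Int) < n)]
    have h10 : PySem.Int.floordiv n 10 = n / 10 := PySem.Int.floordiv_eq_ediv_of_pos (by omega)
    have hm : PySem.Int.mod n 10 = n % 10 := PySem.Int.mod_eq_emod_of_pos (by omega)
    have hq : 0 ≤ n / 10 := by omega
    rw [h10, hm]
    split
    · have := pdrLoop_le (n.toNat - 1 + 1) (n / 10) (0 + n % 10) hq
      omega
    · have := pdrLoop_le (n.toNat - 1 + 1) (n / 10) 0 hq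
      omega

theorem drLoop_irrel : ∀ (f g : Nat) (n : Int), n.toNat < f → n.toNat < g → drLoop f n = drLoop g n := by
  intro f
  induction f with
  | zero => intro g n h; omega
  | succ f ih =>
    intro g n hf hg
    obtain ⟨g', rfl⟩ : ∃ g', g = g' + 1 := ⟨g - 1, by omega⟩
    unfold drLoop
    by_cases h : 10 ≤ n
    · rw [if_pos h, if_pos h]
      obtain ⟨h0, hlt⟩ := pdr_lt n h
      exact ih g' _ (by omega) (by omega)
    · rw [if_neg h, if_neg h]

theorem czLoop_shift : ∀ (k : Nat) (n a : Int), czLoop k n a = a + czLoop k n 0 := by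
  intro k
  induction k with
  | zero => intro n a; simp [czLoop]
  | succ k ih =>
    intro n a
    unfold czLoop
    split
    · rw [ih _ (a + 1), ih _ (0 + 1)]
      ring
    · ring

theorem czLoop_nonneg : ∀ (k : Nat) (n : Int), 0 ≤ czLoop k n 0 := by
  intro k
  induction k with
  | zero => intro n; simp [czLoop]
  | succ k ih =>
    intro n
    unfold czLoop
    split
    · rw [czLoop_shift k _ (0 + 1)]
      have := ih (PySem.Int.floordiv n 10)
      omega
    · omega

theorem czLoop_irrel : ∀ (f g : Nat) (n : Int), n.toNat < f → n.toNat < g → czLoop f n 0 = czLoop g n 0 := by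
  intro f
  induction f with
  | zero => intro g n h; omega
  | succ f ih =>
    intro g n hf hg
    obtain ⟨g', rfl⟩ : ∃ g', g = g' + 1 := ⟨g - 1, by omega⟩
    unfold czLoop
    by_cases h : 0 < n ∧ PySem.Int.mod n 10 = 0
    · rw [if_pos h, if_pos h]
      have h10 : PySem.Int.floordiv n 10 = n / 10 := PySem.Int.floordiv_eq_ediv_of_pos (by omega)
      have hlt : (PySem.Int.floordiv n 10).toNat < n.toNat := by
        rw [h10]; omega
      rw [czLoop_shift f _ (0 + 1), czLoop_shift g' _ (0 + 1), ih g' _ (by omega) (by omega)]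
    · rw [if_neg h, if_neg h]

theorem stripLoop_zero : ∀ (f : Nat) (n c : Int), c ≤ 0 → stripLoop f n c = n := by
  intro f n c hc
  cases f with
  | zero => rfl
  | succ f => unfold stripLoop; rw [if_neg (by omega)]

theorem stripLoop_succ (n c : Int) (hc : 0 ≤ c) :
    stripLoop (c.toNat + 1 + 1) n (1 + c) = stripLoop (c.toNat + 1) (PySem.Int.floordiv n 10) c := by
  show (if 0 < 1 + c then stripLoop (c.toNat + 1) (PySem.Int.floordiv n 10) (1 + c - 1) else n) = _
  rw [if_pos (by omega : (0:Int) < 1 + c)]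
  norm_num

theorem bLoop_irrel : ∀ (f g : Nat) (m z u t s nd : Int), m.toNat < f → m.toNat < g →
    bLoop f m z u t s nd = bLoop g m z u t s nd := by
  intro f
  induction f with
  | zero => intro g m z u t s nd h; omega
  | succ f ih =>
    intro g m z u t s nd hf hg
    obtain ⟨g', rfl⟩ : ∃ g', g = g' + 1 := ⟨g - 1, by omega⟩
    unfold bLoop
    by_cases hm : 0 < m
    · rw [if_pos hm, if_pos hm]
      have h10 : PySem.Int.floordiv m 10 = m / 10 := PySem.Int.floordiv_eq_ediv_of_pos (by omega)
      have hlt : (PySem.Int.floordiv m 10).toNat < m.toNat := by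
        rw [h10]; omega
      split
      · exact ih g' _ _ _ _ _ _ (by omega) (by omega)
      · exact ih g' _ _ _ _ _ _ (by omega) (by omega)
    · rw [if_neg hm, if_neg hm]

-- the tail of the fused pass (ndig ≥ 2): only s and ndig still change, s as pdrLoop
theorem bLoop_tail : ∀ (f : Nat) (m z u t s nd : Int), 2 ≤ nd →
    ∃ nd', bLoop f m z u t s nd = (z, u, t, pdrLoop f m s, nd') ∧ 2 ≤ nd' := by
  intro f
  induction f with
  | zero => intro m z u t s nd h; exact ⟨nd, rfl, h⟩
  | succ f ih =>
    intro m z u t s nd hnd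
    unfold bLoop pdrLoop
    by_cases hm : 0 < m
    · have hne : ¬ (nd = 0 ∧ PySem.Int.mod m 10 = 0) := by rintro ⟨h0, -⟩; omega
      have hn0 : ¬ nd = 0 := by omega
      have hn1 : ¬ nd = 1 := by omega
      rw [if_pos hm, if_pos hm, if_neg hne, if_neg hn0, if_neg hn1]
      exact ih _ _ _ _ _ _ (by omega)
    · rw [if_neg hm, if_neg hm]
      exact ⟨nd, rfl, hnd⟩

-- canonical forms of A's count_zeros and stripped value (proof-side abbreviations)
def czOf (n : Int) : Int := czLoop (n.toNat + 1) n 0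
def stripOf (n : Int) : Int := stripLoop ((czOf n).toNat + 1) n (czOf n)

theorem pdrLoop_nonpos : ∀ (f : Nat) (m s : Int), m ≤ 0 → pdrLoop f m s = s := by
  intro f m s hm
  cases f with
  | zero => rfl
  | succ f => unfold pdrLoop; rw [if_neg (by omega)]

-- main invariant: for n > 0 the fused pass yields A's count_zeros, the last two
-- digits of A's stripped value, its partial digital sum, and ndig = 1 iff it is < 10
theorem bLoop_main : ∀ (k : Nat) (n : Int), n.toNat ≤ k → 0 < n → ∀ (z : Int),
    stripOf n ≤ n ∧ 0 < stripOf n ∧ PySem.Int.mod (stripOf n) 10 ≠ 0 ∧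
    ∃ nd, bLoop (n.toNat + 1) n z 0 0 0 0 =
        (z + czOf n, PySem.Int.mod (stripOf n) 10,
         PySem.Int.mod (PySem.Int.floordiv (stripOf n) 10) 10,
         pdrLoop ((stripOf n).toNat + 1) (stripOf n) 0, nd) ∧
      (nd = 1 ↔ stripOf n < 10) := by
  intro k
  induction k with
  | zero => intro n hn hpos z; omega
  | succ k ih =>
    intro n hn hpos z
    have h10 : PySem.Int.floordiv n 10 = n / 10 := PySem.Int.floordiv_eq_ediv_of_pos (by omega)
    have hmn : PySem.Int.mod n 10 = n % 10 := PySem.Int.mod_eq_emod_of_pos (by omega)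
    by_cases hd : PySem.Int.mod n 10 = 0
    · -- stripping step: n > 0 and n % 10 = 0, so n ≥ 10
      have hn10 : 10 ≤ n := by rw [hmn] at hd; omega
      have hn'pos : 0 < PySem.Int.floordiv n 10 := by rw [h10]; omega
      have hlt : (PySem.Int.floordiv n 10).toNat < n.toNat := by rw [h10]; omega
      have hC'nn : 0 ≤ czOf (PySem.Int.floordiv n 10) := czLoop_nonneg _ _
      have hC : czOf n = 1 + czOf (PySem.Int.floordiv n 10) := by
        unfold czOf
        conv_lhs => unfold czLoop
        rw [if_pos ⟨hpos, hd⟩, czLoop_shift,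
          czLoop_irrel n.toNat ((PySem.Int.floordiv n 10).toNat + 1) _ (by omega) (by omega)]
        omega
      have hM : stripOf n = stripOf (PySem.Int.floordiv n 10) := by
        unfold stripOf
        rw [hC]
        have he : (1 + czOf (PySem.Int.floordiv n 10)).toNat + 1 =
            (czOf (PySem.Int.floordiv n 10)).toNat + 1 + 1 := by omega
        rw [he, stripLoop_succ n _ hC'nn]
      have hB : bLoop (n.toNat + 1) n z 0 0 0 0 =
          bLoop ((PySem.Int.floordiv n 10).toNat + 1) (PySem.Int.floordiv n 10) (z + 1) 0 0 0 0 := by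
        conv_lhs => unfold bLoop
        rw [if_pos hpos, if_pos ⟨rfl, hd⟩]
        exact bLoop_irrel n.toNat _ _ _ _ _ _ _ (by omega) (by omega)
      obtain ⟨hMle, hMpos, hMd, nd, hbeq, hnd⟩ := ih (PySem.Int.floordiv n 10) (by omega) hn'pos (z + 1)
      refine ⟨by rw [hM]; rw [h10] at hMle ⊢; omega, by rw [hM]; exact hMpos, by rw [hM]; exact hMd,
        nd, ?_, by rw [hM]; exact hnd⟩
      rw [hB, hbeq, hC, hM]
      have hz : z + 1 + czOf (PySem.Int.floordiv n 10) = z + (1 + czOf (PySem.Int.floordiv n 10)) := by ring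
      rw [hz]
    · -- no stripping: count_zeros = 0 and the stripped value is n itself
      have hC0 : czOf n = 0 := by
        unfold czOf czLoop
        rw [if_neg (fun h => hd h.2)]
      have hM : stripOf n = n := by
        unfold stripOf
        rw [hC0]
        exact stripLoop_zero _ n 0 le_rfl
      refine ⟨by rw [hM], by rw [hM]; exact hpos, by rw [hM]; exact hd, ?_⟩
      have hnt1 : ∃ f, n.toNat = f + 1 := ⟨n.toNat - 1, by omega⟩
      obtain ⟨f, hf⟩ := hnt1
      have step1 : bLoop (n.toNat + 1) n z 0 0 0 0 =
          bLoop n.toNat (PySem.Int.floordiv n 10) z (PySem.Int.mod n 10) 0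
            (if PySem.Int.mod n 10 ≠ 9 then 0 + PySem.Int.mod n 10 else 0) 1 := by
        conv_lhs => unfold bLoop
        rw [if_pos hpos, if_neg (fun h => hd h.2)]
        norm_num
      have pdr1 : pdrLoop (n.toNat + 1) n 0 =
          pdrLoop n.toNat (PySem.Int.floordiv n 10)
            (if PySem.Int.mod n 10 ≠ 9 then 0 + PySem.Int.mod n 10 else 0) := by
        conv_lhs => unfold pdrLoop
        rw [if_pos hpos]
      by_cases hq : 0 < n / 10
      · -- n ≥ 10: one more digit step, then the nd ≥ 2 tail
        have hq2 : 0 < PySem.Int.floordiv n 10 := by rw [h10]; exact hq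
        have step2 : bLoop n.toNat (PySem.Int.floordiv n 10) z (PySem.Int.mod n 10) 0
              (if PySem.Int.mod n 10 ≠ 9 then 0 + PySem.Int.mod n 10 else 0) 1 =
            bLoop f (PySem.Int.floordiv (PySem.Int.floordiv n 10) 10) z (PySem.Int.mod n 10)
              (PySem.Int.mod (PySem.Int.floordiv n 10) 10)
              (if PySem.Int.mod (PySem.Int.floordiv n 10) 10 ≠ 9 then
                (if PySem.Int.mod n 10 ≠ 9 then 0 + PySem.Int.mod n 10 else 0) +
                  PySem.Int.mod (PySem.Int.floordiv n 10) 10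
               else (if PySem.Int.mod n 10 ≠ 9 then 0 + PySem.Int.mod n 10 else 0)) 2 := by
          rw [hf]
          conv_lhs => unfold bLoop
          rw [if_pos hq2, if_neg (by rintro ⟨h1, -⟩; omega)]
          norm_num
        have pdr2 : pdrLoop n.toNat (PySem.Int.floordiv n 10)
              (if PySem.Int.mod n 10 ≠ 9 then 0 + PySem.Int.mod n 10 else 0) =
            pdrLoop f (PySem.Int.floordiv (PySem.Int.floordiv n 10) 10)
              (if PySem.Int.mod (PySem.Int.floordiv n 10) 10 ≠ 9 then
                (if PySem.Int.mod n 10 ≠ 9 then 0 + PySem.Int.mod n 10 else 0) +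
                  PySem.Int.mod (PySem.Int.floordiv n 10) 10
               else (if PySem.Int.mod n 10 ≠ 9 then 0 + PySem.Int.mod n 10 else 0)) := by
          rw [hf]
          conv_lhs => unfold pdrLoop
          rw [if_pos hq2]
        obtain ⟨nd', htail, hnd'⟩ := bLoop_tail f
          (PySem.Int.floordiv (PySem.Int.floordiv n 10) 10) z (PySem.Int.mod n 10)
          (PySem.Int.mod (PySem.Int.floordiv n 10) 10)
          (if PySem.Int.mod (PySem.Int.floordiv n 10) 10 ≠ 9 then
            (if PySem.Int.mod n 10 ≠ 9 then 0 + PySem.Int.mod n 10 else 0) +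
              PySem.Int.mod (PySem.Int.floordiv n 10) 10
           else (if PySem.Int.mod n 10 ≠ 9 then 0 + PySem.Int.mod n 10 else 0)) 2 le_rfl
        refine ⟨nd', ?_, by constructor <;> intro h <;> [omega; (rw [hM] at h; omega)]⟩
        rw [step1, step2, htail, hC0, hM, pdr1, pdr2]
        norm_num
      · -- 0 < n < 10: the loop stops after the single digit
        have hq0 : PySem.Int.floordiv n 10 = 0 := by rw [h10]; omega
        have hlast : bLoop n.toNat (PySem.Int.floordiv n 10) z (PySem.Int.mod n 10) 0
              (if PySem.Int.mod n 10 ≠ 9 then 0 + PySem.Int.mod n 10 else 0) 1 =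
            (z, PySem.Int.mod n 10, 0,
             (if PySem.Int.mod n 10 ≠ 9 then 0 + PySem.Int.mod n 10 else 0), 1) := by
          rw [hf]
          conv_lhs => unfold bLoop
          rw [if_neg (by rw [hq0]; omega)]
        refine ⟨1, ?_, by rw [hM]; omega⟩
        rw [step1, hlast, hC0, hM, pdr1, hq0, pdrLoop_nonpos n.toNat 0 _ le_rfl]
        simp only [Prod.mk.injEq]
        exact ⟨by ring, by decide⟩

-- the merged three-case condition equals A's four residue tests on the stripped value
theorem cond_merge (M : Int) (hu : PySem.Int.mod M 10 ≠ 0) :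
    (units_test M && test_25 M && test_6units M && test_even4 M) =
      decide ((PySem.Int.mod M 10 = 5 ∧ PySem.Int.mod (PySem.Int.floordiv M 10) 10 = 2) ∨
        (PySem.Int.mod M 10 ∈ ([1, 4, 9] : List Int) ∧
          PySem.Int.mod (PySem.Int.mod (PySem.Int.floordiv M 10) 10) 2 = 0) ∨
        (PySem.Int.mod M 10 = 6 ∧
          PySem.Int.mod (PySem.Int.mod (PySem.Int.floordiv M 10) 10) 2 = 1)) := by
  have e1 : PySem.Int.mod M 10 = M % 10 := PySem.Int.mod_eq_emod_of_pos (by omega)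
  have e2 : PySem.Int.floordiv M 10 = M / 10 := PySem.Int.floordiv_eq_ediv_of_pos (by omega)
  simp only [units_test, test_25, test_6units, test_even4, e1, e2]
  have e3 : PySem.Int.mod (M / 10) 10 = (M / 10) % 10 := PySem.Int.mod_eq_emod_of_pos (by omega)
  have e4 : PySem.Int.mod M 2 = M % 2 := PySem.Int.mod_eq_emod_of_pos (by omega)
  have e5 : PySem.Int.mod M 100 = M % 100 := PySem.Int.mod_eq_emod_of_pos (by omega)
  rw [e3, e4, e5]
  have e6 : PySem.Int.mod (M % 100) 4 = (M % 100) % 4 := PySem.Int.mod_eq_emod_of_pos (by omega)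
  have e7 : PySem.Int.mod ((M / 10) % 10) 2 = ((M / 10) % 10) % 2 := PySem.Int.mod_eq_emod_of_pos (by omega)
  rw [e6, e7]
  rw [e1] at hu
  have h2 : M % 2 = (M % 10) % 2 := by omega
  have h4 : (M % 100) % 4 = (((M / 10) % 10) * 10 + M % 10) % 4 := by omega
  rw [h2, h4]
  obtain ⟨u, hu1, hu2, hueq⟩ : ∃ u, 1 ≤ u ∧ u ≤ 9 ∧ M % 10 = u := ⟨M % 10, by omega, by omega, rfl⟩
  obtain ⟨t, ht1, ht2, hteq⟩ : ∃ t, 0 ≤ t ∧ t ≤ 9 ∧ (M / 10) % 10 = t :=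
    ⟨(M / 10) % 10, by omega, by omega, rfl⟩
  rw [hueq, hteq]
  interval_cases u <;> interval_cases t <;> decide

-- a guarded-else if on a decidable proposition is a conjunction
theorem if_not_false (P : Prop) [Decidable P] (X : Bool) :
    (if ¬ P then false else X) = (decide P && X) := by
  by_cases h : P <;> simp [h]

theorem is_PSq_neg (n : Int) (hpos : ¬ 0 < n) : is_PSq n = false := by
  have h0 : n.toNat = 0 := by omega
  have hc : czLoop (n.toNat + 1) n 0 = 0 := by
    rw [h0]
    unfold czLoop
    rw [if_neg (fun h => hpos h.1)]
  have hs : stripLoop ((0 : Int).toNat + 1) n 0 = n := stripLoop_zero _ n 0 le_rfl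
  have hdr : drLoop (n.toNat + 1) n = n := by
    rw [h0]
    unfold drLoop
    rw [if_neg (by omega)]
  have hroot : test_root n = false := by
    simp only [test_root, digital_root, hdr, List.mem_cons, List.not_mem_nil, or_false,
      decide_eq_false_iff_not]
    omega
  have hm02 : PySem.Int.mod (0 : Int) 2 = 0 := by decide
  simp only [is_PSq, count_zeros, hc, hs, hroot, hm02, ne_eq, not_true_eq_false, not_false_eq_true,
    if_false, if_true, Bool.false_eq_true]
  cases h : units_test n <;> simp

theorem is_PSq_alt_neg (n : Int) (hpos : ¬ 0 < n) : is_PSq_alt n = false := by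
  have h0 : n.toNat = 0 := by omega
  have hb : bLoop (n.toNat + 1) n 0 0 0 0 0 = (0, 0, 0, 0, 0) := by
    rw [h0]
    unfold bLoop
    rw [if_neg hpos]
  simp only [is_PSq_alt, hb]
  norm_num

-- ===== VERDICT (by name: the statement is the Claim_ definition above) =====
theorem is_PSq_spec : Claim_equal_is_PSq := by
  intro n _
  unfold Spec_is_PSq
  by_cases hpos : 0 < n
  · obtain ⟨hMle, hMpos, hMd, nd, hbeq, hnd⟩ := bLoop_main n.toNat n le_rfl hpos 0
    have ecz : czLoop (n.toNat + 1) n 0 = czOf n := rfl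
    have est : stripLoop ((czOf n).toNat + 1) n (czOf n) = stripOf n := rfl
    simp only [is_PSq, is_PSq_alt, count_zeros, hbeq, ecz, est, zero_add]
    by_cases hpar : PySem.Int.mod (czOf n) 2 ≠ 0
    · rw [if_pos hpar, if_pos hpar]
    · rw [if_neg hpar, if_neg hpar]
      have hcm := cond_merge (stripOf n) hMd
      conv_rhs => rw [if_not_false]
      rw [← hcm]
      have hroot : (decide (bRedLoop ((if nd = 1 then PySem.Int.mod (stripOf n) 10
            else pdrLoop ((stripOf n).toNat + 1) (stripOf n) 0).toNat + 1)
          (if nd = 1 then PySem.Int.mod (stripOf n) 10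
            else pdrLoop ((stripOf n).toNat + 1) (stripOf n) 0) ∈ ([1, 4, 7, 9] : List Int)))
          = test_root (stripOf n) := by
        by_cases hnd1 : nd = 1
        · have hlt10 : stripOf n < 10 := hnd.mp hnd1
          have hmm : PySem.Int.mod (stripOf n) 10 = stripOf n := by
            rw [PySem.Int.mod_eq_emod_of_pos (by omega)]
            omega
          simp only [if_pos hnd1, hmm, bRedLoop_eq_drLoop]
          rfl
        · have hge10 : 10 ≤ stripOf n := by
            by_contra hcon
            exact hnd1 (hnd.mpr (by omega))
          simp only [if_neg hnd1]
          have hpdr : pdrLoop ((stripOf n).toNat + 1) (stripOf n) 0 = partial_digital_root (stripOf n) := rfl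
          rw [hpdr, bRedLoop_eq_drLoop]
          obtain ⟨hr0, hrlt⟩ := pdr_lt (stripOf n) hge10
          have hdr : drLoop ((stripOf n).toNat + 1) (stripOf n) =
              drLoop ((partial_digital_root (stripOf n)).toNat + 1) (partial_digital_root (stripOf n)) := by
            conv_lhs => unfold drLoop
            rw [if_pos hge10]
            exact drLoop_irrel _ _ _ (by omega) (by omega)
          unfold test_root digital_root
          rw [hdr]
      rw [hroot]
      cases hU : units_test (stripOf n) <;> cases hR : test_root (stripOf n) <;>
        cases h25 : test_25 (stripOf n) <;> cases h6 : test_6units (stripOf n) <;>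
        cases hE : test_even4 (stripOf n) <;> simp
  · rw [is_PSq_neg n hpos, is_PSq_alt_neg n hpos]
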